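-- pv_equiv track=rewrite | github.com/alexbarashov/rfgen | rfgen/standards/dsc_common.py | _mmsi_to_symbols
-- ===== SOURCE A (Python) =====
-- from typing import List
--
-- def _mmsi_to_symbols(mmsi: str) -> List[int]:
--     """
--     Convert MMSI string to 5 two-digit symbols (pads with leading zeros).
--
--     Args:
--         mmsi: MMSI string (typically 9 digits)
--
--     Returns:
--         List of 5 symbols (00-99 each)
--     """
--     s = ''.join(ch for ch in mmsi if ch.isdigit())
--     s = s.zfill(9)  # MMSI is 9 digits
--     # Pad to even length and split by 2
--     if len(s) % 2 == 1:
--         s = '0' + s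
--     pairs = [int(s[i:i+2]) for i in range(0, len(s), 2)]
--     # Ensure exactly 5 symbols
--     if len(pairs) < 5:
--         pairs = [0] * (5 - len(pairs)) + pairs
--     elif len(pairs) > 5:
--         pairs = pairs[-5:]
--     return pairs
-- ===== SOURCE B (Python) =====
-- def _mmsi_to_symbols(mmsi):
--     """Same result via integer arithmetic: stream the digits into an
--     accumulator kept modulo 10**10, then peel off the 5 two-digit symbols
--     with repeated divmod."""
--     m = 0
--     for ch in mmsi:
--         if ch.isdigit():
--             m = (m * 10 + (ord(ch) - 48)) % 10**10
--     out = []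
--     for _ in range(5):
--         m, r = divmod(m, 100)
--         out.append(r)
--     out.reverse()
--     return out
-- ===== Notes on version B (the rewrite author's own statement) =====
-- stated objective: alternative
-- what changed: Replaces A's string machinery (zfill, even-length padding, slicing into 2-char chunks, pad-or-trim to 5) by pure integer arithmetic: fold the digits into an accumulator kept modulo 10**10, then peel the 5 symbols with repeated divmod and reverse.
import Mathlib
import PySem

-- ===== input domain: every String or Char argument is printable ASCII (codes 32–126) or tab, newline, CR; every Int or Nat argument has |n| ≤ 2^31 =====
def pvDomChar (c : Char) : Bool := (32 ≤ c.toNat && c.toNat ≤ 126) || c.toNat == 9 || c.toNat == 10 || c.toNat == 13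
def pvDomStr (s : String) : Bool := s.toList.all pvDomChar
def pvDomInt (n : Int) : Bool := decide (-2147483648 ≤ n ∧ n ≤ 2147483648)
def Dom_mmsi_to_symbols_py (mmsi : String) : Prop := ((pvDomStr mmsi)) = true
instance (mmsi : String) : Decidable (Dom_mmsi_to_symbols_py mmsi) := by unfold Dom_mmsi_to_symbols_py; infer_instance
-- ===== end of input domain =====

-- B replaces A's string machinery (zfill / even-length pad / 2-char slices / pad-or-trim to 5)
-- by integer arithmetic: fold the digits into an accumulator modulo 10^10, then peel the 5
-- symbols with repeated divmod; objective: alternative (same O(n) cost).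

-- ===== PORT A =====
def mmsi_to_symbols_py (mmsi : String) : List Int :=
  -- s = ''.join(ch for ch in mmsi if ch.isdigit())   (kept as List Char)
  let s0 := mmsi.toList.filter (fun ch => PySem.Chars.isdigit ch)
  -- s = s.zfill(9)
  let s1 := PySem.Chars.zfill s0 9
  -- if len(s) % 2 == 1: s = '0' + s
  let s2 := if PySem.Int.mod ((s1.length : Nat) : Int) 2 == 1 then '0' :: s1 else s1
  -- pairs = [int(s[i:i+2]) for i in range(0, len(s), 2)]
  -- (s2 is all digits here, so int() always succeeds; the .getD 0 default is unreachable)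
  let pairs := (PySem.List.pyRange 0 ((s2.length : Nat) : Int) 2).map
      (fun i => (PySem.Int.ofChars? (PySem.List.slice s2 (some i) (some (i + 2)))).getD 0)
  if pairs.length < 5 then List.replicate (5 - pairs.length) (0 : Int) ++ pairs
  else if 5 < pairs.length then PySem.List.slice pairs (some (-5)) none
  else pairs

-- ===== PORT B =====
def mmsi_to_symbols_py_alt (mmsi : String) : List Int :=
  -- m = 0; for ch in mmsi: if ch.isdigit(): m = (m*10 + (ord(ch)-48)) % 10**10
  let m := mmsi.toList.foldl
    (fun m ch => if PySem.Chars.isdigit ch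
                 then PySem.Int.mod (m * 10 + ((ch.toNat : Int) - 48)) (10 ^ 10)
                 else m) 0
  -- out = []; for _ in range(5): m, r = divmod(m, 100); out.append(r)
  let st := (PySem.List.pyRange 0 5 1).foldl
      (fun (st : Int × List Int) _ =>
        (PySem.Int.floordiv st.1 100, st.2 ++ [PySem.Int.mod st.1 100])) (m, ([] : List Int))
  -- out.reverse(); return out
  st.2.reverse

-- ===== PRECONDITION & SPEC =====
def Spec_mmsi_to_symbols_py (mmsi : String) (out : List Int) : Prop := out = mmsi_to_symbols_py_alt mmsi
instance (mmsi : String) (out : List Int) : Decidable (Spec_mmsi_to_symbols_py mmsi out) := by unfold Spec_mmsi_to_symbols_py; infer_instance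

-- ===== CLAIM (what is proved, stated in full; the proofs are below) =====
def Claim_equal_mmsi_to_symbols_py : Prop := ∀ (mmsi : String), Dom_mmsi_to_symbols_py mmsi → Spec_mmsi_to_symbols_py mmsi (mmsi_to_symbols_py mmsi)

-- ===== LEMMAS AND PROOFS =====

-- decimal value of a digit character
def pvDv (c : Char) : Nat := c.toNat - 48

-- value of a digit string read onto an accumulator (exactly B's fold shape, in Nat)
def pvN (a : Nat) (l : List Char) : Nat := l.foldl (fun a c => a * 10 + pvDv c) a

-- the k base-100 digits of n, most significant first
def pvD100 : Nat → Nat → List Nat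
  | 0, _ => []
  | k + 1, n => (n / 100 ^ k % 100) :: pvD100 k n

lemma pvN_shift (l : List Char) (a : Nat) : pvN a l = a * 10 ^ l.length + pvN 0 l := by
  induction l generalizing a with
  | nil => simp [pvN]
  | cons c t ih =>
    simp only [pvN, List.foldl_cons] at *
    rw [ih (a * 10 + pvDv c), ih (0 * 10 + pvDv c)]
    simp only [List.length_cons, pow_succ]
    ring

lemma pvDv_lt {c : Char} (h : PySem.Chars.isdigit c = true) : pvDv c < 10 := by
  have hb : 48 ≤ c.toNat ∧ c.toNat ≤ 57 := by
    simp only [PySem.Chars.isdigit, Bool.and_eq_true, decide_eq_true_eq, Char.le_def,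
      UInt32.le_iff_toNat_le] at h
    exact h
  unfold pvDv
  omega

lemma pvN_lt {l : List Char} (h : ∀ c ∈ l, PySem.Chars.isdigit c = true) :
    pvN 0 l < 10 ^ l.length := by
  induction l with
  | nil => simp [pvN]
  | cons c t ih =>
    have hc := pvDv_lt (h c (by simp))
    have ht := ih (fun x hx => h x (List.mem_cons_of_mem _ hx))
    have hshift : pvN 0 (c :: t) = pvDv c * 10 ^ t.length + pvN 0 t := by
      show pvN (0 * 10 + pvDv c) t = _
      rw [pvN_shift t]
      ring_nf
    rw [hshift]
    have hp : (10 : Nat) ^ (c :: t).length = 10 * 10 ^ t.length := by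
      simp only [List.length_cons, pow_succ]
      ring
    rw [hp]
    nlinarith

lemma pvN_zeros (p : Nat) (l : List Char) :
    pvN 0 (List.replicate p '0' ++ l) = pvN 0 l := by
  induction p with
  | zero => simp
  | succ q ih =>
    simp only [List.replicate_succ, List.cons_append, pvN, List.foldl_cons] at *
    have h0 : 0 * 10 + pvDv '0' = 0 := by decide
    rw [h0]
    exact ih

lemma pvD100_high (k a m : Nat) : pvD100 k (a * 100 ^ k + m) = pvD100 k m := by
  induction k generalizing a with
  | zero => simp [pvD100]
  | succ j ih =>
    simp only [pvD100]
    congr 1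
    · have h1 : a * 100 ^ (j + 1) + m = m + 100 ^ j * (a * 100) := by ring
      rw [h1, Nat.add_mul_div_left _ _ (by positivity : 0 < (100 : Nat) ^ j),
          Nat.add_mul_mod_self_right]
    · have h2 : a * 100 ^ (j + 1) + m = (a * 100) * 100 ^ j + m := by ring
      rw [h2, ih]

lemma pvD100_mod (k n : Nat) : pvD100 k (n % 100 ^ k) = pvD100 k n := by
  conv_rhs => rw [← Nat.div_add_mod' n (100 ^ k)]
  rw [pvD100_high]

lemma pvD100_length (k n : Nat) : (pvD100 k n).length = k := by
  induction k generalizing n with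
  | zero => simp [pvD100]
  | succ j ih => simp [pvD100, ih]

lemma pvD100_drop {j k : Nat} (h : j ≤ k) (n : Nat) :
    (pvD100 k n).drop (k - j) = pvD100 j n := by
  induction k with
  | zero =>
    have hj : j = 0 := by omega
    subst hj
    simp [pvD100]
  | succ i ih =>
    by_cases hj : j = i + 1
    · subst hj
      simp
    · have hji : j ≤ i := by omega
      have hstep : i + 1 - j = (i - j) + 1 := by omega
      rw [hstep]
      simp only [pvD100, List.drop_succ_cons]
      exact ih hji

-- every digit char is one of the ten literals
lemma pv_mem_digits {c : Char} (h : PySem.Chars.isdigit c = true) :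
    c ∈ ['0','1','2','3','4','5','6','7','8','9'] := by
  simp only [PySem.Chars.isdigit, Bool.and_eq_true, decide_eq_true_eq, Char.le_def,
    UInt32.le_iff_toNat_le] at h
  obtain ⟨h1, h2⟩ := h
  have e : ∀ (d : Char), c.val.toNat = d.val.toNat → c = d :=
    fun d hd => Char.ext (UInt32.toNat_inj.mp hd)
  have h1' : 48 ≤ c.val.toNat := h1
  have h2' : c.val.toNat ≤ 57 := h2
  set n := c.val.toNat with hn
  interval_cases n <;>
    first
    | simp [e '0' (by decide)]
    | simp [e '1' (by decide)]
    | simp [e '2' (by decide)]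
    | simp [e '3' (by decide)]
    | simp [e '4' (by decide)]
    | simp [e '5' (by decide)]
    | simp [e '6' (by decide)]
    | simp [e '7' (by decide)]
    | simp [e '8' (by decide)]
    | simp [e '9' (by decide)]

lemma pv_ofChars2 {a b : Char} (ha : PySem.Chars.isdigit a = true)
    (hb : PySem.Chars.isdigit b = true) :
    PySem.Int.ofChars? [a, b] = some ((10 * pvDv a + pvDv b : Nat) : Int) := by
  have h1 := pv_mem_digits ha
  have h2 := pv_mem_digits hb
  fin_cases h1 <;> fin_cases h2 <;> decide

lemma pv_zfill9 {l : List Char} (h : ∀ c ∈ l, PySem.Chars.isdigit c = true) :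
    PySem.Chars.zfill l 9 = List.replicate (9 - l.length) '0' ++ l := by
  unfold PySem.Chars.zfill
  by_cases hl : (9 : Int) ≤ ((l.length : Nat) : Int)
  · rw [if_pos hl]
    have h0 : 9 - l.length = 0 := by omega
    rw [h0]
    simp
  · rw [if_neg hl]
    cases l with
    | nil => decide
    | cons c t =>
      have hc := h c (by simp)
      have hplus : ¬(c = '+' ∨ c = '-') := by
        rintro (rfl | rfl) <;> exact absurd hc (by decide)
      simp only [if_neg hplus]
      have h9 : (9 : Int).toNat = 9 := rfl
      rw [h9]

-- the pairs comprehension over an even-length all-digit list is the base-100 digit list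
lemma pv_pairs : ∀ {k : Nat} {l : List Char}, (∀ c ∈ l, PySem.Chars.isdigit c = true) →
    l.length = 2 * k →
    (List.range k).map (fun j => ((PySem.Int.ofChars? ((l.drop (2 * j)).take 2)).getD 0)) =
      (pvD100 k (pvN 0 l)).map (fun (n : Nat) => (n : Int)) := by
  intro k
  induction k with
  | zero => intro l _ _; simp [pvD100]
  | succ i ih =>
    intro l h hlen
    match l, hlen with
    | a :: b :: t, hlen =>
      have ha := h a (by simp)
      have hb := h b (by simp)
      have ht : ∀ c ∈ t, PySem.Chars.isdigit c = true := fun c hc => h c (by simp [hc])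
      have htlen : t.length = 2 * i := by
        simp only [List.length_cons] at hlen
        omega
      have hpow : (10 : Nat) ^ (2 * i) = 100 ^ i := by
        rw [pow_mul]
        norm_num
      have hNt : pvN 0 t < 100 ^ i := by
        have h10 := pvN_lt ht
        rw [htlen, hpow] at h10
        exact h10
      have hsplit : pvN 0 (a :: b :: t) = (10 * pvDv a + pvDv b) * 100 ^ i + pvN 0 t := by
        show pvN ((0 * 10 + pvDv a) * 10 + pvDv b) t = _
        rw [pvN_shift t, htlen, hpow]
        ring
      have hD : pvD100 (i + 1) (pvN 0 (a :: b :: t)) =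
          (10 * pvDv a + pvDv b) :: pvD100 i (pvN 0 t) := by
        simp only [pvD100]
        rw [hsplit]
        congr 1
        · have hcomm : (10 * pvDv a + pvDv b) * 100 ^ i + pvN 0 t =
              pvN 0 t + 100 ^ i * (10 * pvDv a + pvDv b) := by ring
          rw [hcomm, Nat.add_mul_div_left _ _ (by positivity : 0 < (100 : Nat) ^ i),
              Nat.div_eq_of_lt hNt, Nat.zero_add,
              Nat.mod_eq_of_lt (by have := pvDv_lt ha; have := pvDv_lt hb; omega)]
        · exact pvD100_high i _ _
      rw [List.range_succ_eq_map, hD]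
      simp only [List.map_cons, List.map_map]
      refine List.cons_eq_cons.mpr ⟨?_, ?_⟩
      · simp only [Nat.mul_zero, List.drop_zero]
        rw [show (a :: b :: t).take 2 = [a, b] from rfl, pv_ofChars2 ha hb]
        rfl
      · rw [← ih ht htlen]
        apply List.map_congr_left
        intro j _
        simp only [Function.comp_apply]
        have hdd : (a :: b :: t).drop (2 * (j + 1)) = t.drop (2 * j) := by
          have h2 : 2 * (j + 1) = 2 * j + 1 + 1 := by ring
          rw [h2, List.drop_succ_cons, List.drop_succ_cons]
        rw [hdd]

-- the slice/range comprehension followed by the pad-or-trim branch, on an even-length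
-- all-digit list of length ≥ 10
lemma pvA_core {k : Nat} {l2 : List Char} (h2 : ∀ c ∈ l2, PySem.Chars.isdigit c = true)
    (hlen : l2.length = 2 * k) (hk : 5 ≤ k) :
    (let pairs := (PySem.List.pyRange 0 ((l2.length : Nat) : Int) 2).map
        (fun i => (PySem.Int.ofChars? (PySem.List.slice l2 (some i) (some (i + 2)))).getD 0)
     if pairs.length < 5 then List.replicate (5 - pairs.length) (0 : Int) ++ pairs
     else if 5 < pairs.length then PySem.List.slice pairs (some (-5)) none
     else pairs)
    = (pvD100 5 (pvN 0 l2)).map (fun (n : Nat) => (n : Int)) := by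
  have hrange : PySem.List.pyRange 0 ((l2.length : Nat) : Int) 2 =
      (List.range k).map (fun j => ((2 * j : Nat) : Int)) := by
    rw [PySem.List.pyRange_of_pos 0 _ (by norm_num : (0 : Int) < 2), hlen]
    rw [if_pos (by push_cast; omega)]
    have hcnt : ((((2 * k : Nat) : Int) - 0 + 2 - 1) / 2).toNat = k := by
      push_cast
      omega
    rw [hcnt]
    apply List.map_congr_left
    intro j _
    push_cast
    ring
  have hslice : ∀ j : Nat, PySem.List.slice l2 (some ((2 * j : Nat) : Int))
      (some (((2 * j : Nat) : Int) + 2)) = (l2.drop (2 * j)).take 2 := by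
    intro j
    have hcast : (((2 * j : Nat) : Int) + 2) = (((2 * j + 2 : Nat)) : Int) := by push_cast; ring
    rw [hcast, PySem.List.slice_natCast]
    have h2 : 2 * j + 2 - 2 * j = 2 := by omega
    rw [h2]
  have hpairs : (PySem.List.pyRange 0 ((l2.length : Nat) : Int) 2).map
      (fun i => (PySem.Int.ofChars? (PySem.List.slice l2 (some i) (some (i + 2)))).getD 0)
      = (pvD100 k (pvN 0 l2)).map (fun (n : Nat) => (n : Int)) := by
    rw [hrange, List.map_map, ← pv_pairs h2 hlen]
    apply List.map_congr_left
    intro j _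
    simp only [Function.comp_apply]
    rw [hslice j]
  simp only [hpairs, List.length_map, pvD100_length]
  rw [if_neg (by omega : ¬ k < 5)]
  by_cases h5 : 5 < k
  · rw [if_pos h5, PySem.List.slice_from_neg_ofNat _ 5 (by norm_num)]
    simp only [List.length_map, pvD100_length]
    rw [← List.map_drop, pvD100_drop hk]
  · rw [if_neg h5]
    have hk5 : k = 5 := by omega
    subst hk5
    rfl

-- A's whole body after the digit filter
lemma pvA (l : List Char) (h : ∀ c ∈ l, PySem.Chars.isdigit c = true) :
    (let s1 := PySem.Chars.zfill l 9
     let s2 := if PySem.Int.mod ((s1.length : Nat) : Int) 2 == 1 then '0' :: s1 else s1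
     let pairs := (PySem.List.pyRange 0 ((s2.length : Nat) : Int) 2).map
        (fun i => (PySem.Int.ofChars? (PySem.List.slice s2 (some i) (some (i + 2)))).getD 0)
     if pairs.length < 5 then List.replicate (5 - pairs.length) (0 : Int) ++ pairs
     else if 5 < pairs.length then PySem.List.slice pairs (some (-5)) none
     else pairs)
    = (pvD100 5 (pvN 0 l)).map (fun (n : Nat) => (n : Int)) := by
  have hmod2 : ∀ n : Nat, (PySem.Int.mod ((n : Nat) : Int) 2 == 1) = decide (n % 2 = 1) := by
    intro n
    have h2 : PySem.Int.mod ((n : Nat) : Int) 2 = ((n % 2 : Nat) : Int) := by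
      exact_mod_cast PySem.Int.mod_natCast n 2
    rw [h2]
    rcases Nat.mod_two_eq_zero_or_one n with h' | h' <;> simp [h']
  have hall : ∀ p : Nat, ∀ c ∈ List.replicate p '0' ++ l, PySem.Chars.isdigit c = true := by
    intro p c hc
    rcases List.mem_append.mp hc with hc' | hc'
    · rw [List.eq_of_mem_replicate hc']
      decide
    · exact h c hc'
  have step : ∀ p k : Nat, p + l.length = 2 * k → 5 ≤ k →
      (let s2 := List.replicate p '0' ++ l
       let pairs := (PySem.List.pyRange 0 ((s2.length : Nat) : Int) 2).map
          (fun i => (PySem.Int.ofChars? (PySem.List.slice s2 (some i) (some (i + 2)))).getD 0)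
       if pairs.length < 5 then List.replicate (5 - pairs.length) (0 : Int) ++ pairs
       else if 5 < pairs.length then PySem.List.slice pairs (some (-5)) none
       else pairs)
      = (pvD100 5 (pvN 0 l)).map (fun (n : Nat) => (n : Int)) := by
    intro p k hpk hk
    have hlen2 : (List.replicate p '0' ++ l).length = 2 * k := by
      simp only [List.length_append, List.length_replicate]
      omega
    rw [pvA_core (hall p) hlen2 hk, pvN_zeros]
  simp only [pv_zfill9 h, List.length_append, List.length_replicate, hmod2]
  by_cases hpar : (9 - l.length + l.length) % 2 = 1
  · simp only [hpar, decide_true, if_pos]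
    have hcons : '0' :: (List.replicate (9 - l.length) '0' ++ l) =
        List.replicate (9 - l.length + 1) '0' ++ l := by
      rw [List.replicate_succ, List.cons_append]
    rw [hcons]
    exact step (9 - l.length + 1) ((9 - l.length + 1 + l.length) / 2) (by omega) (by omega)
  · simp only [hpar, decide_false, if_neg, Bool.false_eq_true, not_false_iff]
    exact step (9 - l.length) ((9 - l.length + l.length) / 2) (by omega) (by omega)

-- B's running accumulator is the digit value modulo 10^10
lemma pvBfold (l : List Char) (h : ∀ c ∈ l, PySem.Chars.isdigit c = true) : ∀ n : Nat,
    l.foldl (fun m ch => PySem.Int.mod (m * 10 + ((ch.toNat : Int) - 48)) (10 ^ 10))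
        ((n % 10 ^ 10 : Nat) : Int)
      = ((pvN n l % 10 ^ 10 : Nat) : Int) := by
  induction l with
  | nil => intro n; simp [pvN]
  | cons c t ih =>
    intro n
    have hc : 48 ≤ c.toNat := by
      have hb := pvDv_lt (h c (by simp))
      have : PySem.Chars.isdigit c = true := h c (by simp)
      simp only [PySem.Chars.isdigit, Bool.and_eq_true, decide_eq_true_eq, Char.le_def,
        UInt32.le_iff_toNat_le] at this
      exact this.1
    have ht : ∀ x ∈ t, PySem.Chars.isdigit x = true := fun x hx => h x (by simp [hx])
    simp only [List.foldl_cons]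
    have harg : ((n % 10 ^ 10 : Nat) : Int) * 10 + ((c.toNat : Int) - 48) =
        (((n % 10 ^ 10) * 10 + pvDv c : Nat) : Int) := by
      unfold pvDv
      push_cast [hc]
      ring
    have hmodc : PySem.Int.mod ((((n % 10 ^ 10) * 10 + pvDv c : Nat)) : Int) (10 ^ 10) =
        ((((n % 10 ^ 10) * 10 + pvDv c) % 10 ^ 10 : Nat) : Int) := by
      exact_mod_cast PySem.Int.mod_natCast ((n % 10 ^ 10) * 10 + pvDv c) (10 ^ 10)
    have hmeq : ((n % 10 ^ 10) * 10 + pvDv c) % 10 ^ 10 = (n * 10 + pvDv c) % 10 ^ 10 :=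
      ((Nat.mod_modEq n (10 ^ 10)).mul_right 10).add_right (pvDv c)
    rw [harg, hmodc, hmeq]
    have := ih ht (n * 10 + pvDv c)
    rw [this]
    rfl

lemma pv_fd (x : Nat) : PySem.Int.floordiv ((x : Nat) : Int) 100 = ((x / 100 : Nat) : Int) := by
  exact_mod_cast PySem.Int.floordiv_natCast x 100

lemma pv_md (x : Nat) : PySem.Int.mod ((x : Nat) : Int) 100 = ((x % 100 : Nat) : Int) := by
  exact_mod_cast PySem.Int.mod_natCast x 100

lemma pvD100_five (n : Nat) :
    pvD100 5 n = [n / 100 ^ 4 % 100, n / 100 ^ 3 % 100, n / 100 ^ 2 % 100,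
      n / 100 ^ 1 % 100, n / 100 ^ 0 % 100] := rfl

-- B's whole body
lemma pvB (l : List Char) :
    (let m := l.foldl
        (fun m ch => if PySem.Chars.isdigit ch
                     then PySem.Int.mod (m * 10 + ((ch.toNat : Int) - 48)) (10 ^ 10)
                     else m) 0
     let st := (PySem.List.pyRange 0 5 1).foldl
        (fun (st : Int × List Int) _ =>
          (PySem.Int.floordiv st.1 100, st.2 ++ [PySem.Int.mod st.1 100])) (m, ([] : List Int))
     st.2.reverse)
    = (pvD100 5 (pvN 0 (l.filter (fun ch => PySem.Chars.isdigit ch)))).map (fun (n : Nat) => (n : Int)) := by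
  have hdig : ∀ c ∈ l.filter (fun ch => PySem.Chars.isdigit ch), PySem.Chars.isdigit c = true :=
    fun c hc => by simpa using (List.mem_filter.mp hc).2
  have hm : l.foldl
      (fun m ch => if PySem.Chars.isdigit ch
                   then PySem.Int.mod (m * 10 + ((ch.toNat : Int) - 48)) (10 ^ 10)
                   else m) 0
      = ((pvN 0 (l.filter (fun ch => PySem.Chars.isdigit ch)) % 10 ^ 10 : Nat) : Int) := by
    rw [PySem.List.foldl_if_eq_foldl_filter]
    have h0 : (0 : Int) = (((0 % 10 ^ 10 : Nat)) : Int) := by norm_num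
    calc (l.filter (fun ch => PySem.Chars.isdigit ch)).foldl
          (fun m ch => PySem.Int.mod (m * 10 + ((ch.toNat : Int) - 48)) (10 ^ 10)) 0
        = (l.filter (fun ch => PySem.Chars.isdigit ch)).foldl
          (fun m ch => PySem.Int.mod (m * 10 + ((ch.toNat : Int) - 48)) (10 ^ 10))
          (((0 % 10 ^ 10 : Nat)) : Int) := by rw [← h0]
      _ = _ := pvBfold _ hdig 0
  have hrange5 : PySem.List.pyRange 0 5 1 = [0, 1, 2, 3, 4] := by decide
  simp only [hm, hrange5, List.foldl_cons, List.foldl_nil, pv_fd, pv_md]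
  have h1005 : (100 : Nat) ^ 5 = 10 ^ 10 := by norm_num
  rw [← pvD100_mod 5 (pvN 0 (l.filter (fun ch => PySem.Chars.isdigit ch))), h1005,
      pvD100_five]
  simp [Nat.div_div_eq_div_mul]

-- ===== VERDICT (by name: the statement is the Claim_ definition above) =====
theorem mmsi_to_symbols_py_spec : Claim_equal_mmsi_to_symbols_py := by
  intro mmsi _
  show mmsi_to_symbols_py mmsi = mmsi_to_symbols_py_alt mmsi
  have hdig : ∀ c ∈ mmsi.toList.filter (fun ch => PySem.Chars.isdigit ch),
      PySem.Chars.isdigit c = true :=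
    fun c hc => by simpa using (List.mem_filter.mp hc).2
  exact (pvA _ hdig).trans (pvB mmsi.toList).symm
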